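-- pv_equiv track=rewrite | github.com/rjackowens/Azure-DevOps-Pipelines-Generator | src/ruamel_test.py | indent_type
-- ===== SOURCE A (Python) =====
-- def indent_type(s):
--     levels = []
--     ret_val = ''
--     for line in s.splitlines(True):
--         ls = line.lstrip()
--         indent = len(line) - len(ls)
--         if 'created' in ls:
--             levels.append(indent)
--         ret_val += '  ' * len(levels) + line
--     return ret_val
-- ===== SOURCE B (Python) =====
-- def indent_type(s):
--     lines = s.splitlines(True)
--     c = sum('created' in line for line in lines)
--     out = []
--     for line in reversed(lines):
--         out.append('  ' * c + line)
--         if 'created' in line: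
--             c -= 1
--     return ''.join(reversed(out))
-- ===== Notes on version B (the rewrite author's own statement) =====
-- stated objective: alternative
-- what changed: B precomputes the total number of marker-containing lines, then emits lines back-to-front with a countdown and one final join, replacing A's forward levels-list accumulation and repeated string concatenation (and tests the marker against the raw line, dropping the lstrip).
import Mathlib
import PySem

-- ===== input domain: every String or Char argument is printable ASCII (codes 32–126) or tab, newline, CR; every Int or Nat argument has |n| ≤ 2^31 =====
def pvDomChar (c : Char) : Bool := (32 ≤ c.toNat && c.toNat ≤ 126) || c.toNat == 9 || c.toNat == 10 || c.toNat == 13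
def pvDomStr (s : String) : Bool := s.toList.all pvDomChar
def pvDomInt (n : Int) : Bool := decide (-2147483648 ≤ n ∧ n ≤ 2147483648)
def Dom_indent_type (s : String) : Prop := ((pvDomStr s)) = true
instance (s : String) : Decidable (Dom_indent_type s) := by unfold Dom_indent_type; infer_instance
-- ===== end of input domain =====

-- B builds the result back-to-front: it precomputes the total 'created' count, emits lines in
-- reverse while counting down, and joins once — an alternative traversal replacing A's forward
-- accumulation of a levels list and repeated string concatenation.


-- ===== PORT A =====
-- s.splitlines(True) ported by hand (both Pythons call it): exact for the line breaks
-- '\n', '\r', '\r\n' — the only line-break characters admitted by Dom_indent_type.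
def pvSplitlinesKeep : List Char → List (List Char)
  | [] => []
  | '\r' :: '\n' :: rest => ['\r', '\n'] :: pvSplitlinesKeep rest
  | c :: rest =>
    if c = '\n' ∨ c = '\r' then [c] :: pvSplitlinesKeep rest
    else
      match pvSplitlinesKeep rest with
      | [] => [[c]]
      | l :: ls => (c :: l) :: ls

def indent_type (s : String) : String :=
  -- state = (levels : List Int, ret_val : List Char); '  ' * n is PySem.List.pyRepeat
  let r := (pvSplitlinesKeep s.toList).foldl
    (fun (st : List Int × List Char) line =>
      let ls := PySem.Chars.lstrip line
      let indent : Int := (line.length : Int) - (ls.length : Int)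
      let levels := if PySem.Chars.isIn ("created".toList) ls then st.1 ++ [indent] else st.1
      (levels, st.2 ++ PySem.List.pyRepeat ("  ".toList) (levels.length : Int) ++ line))
    ([], [])
  String.mk r.2

-- ===== PORT B =====
def indent_type_alt (s : String) : String :=
  let lines := pvSplitlinesKeep s.toList
  -- c = sum('created' in line for line in lines)  (a 0/1-sum is countP)
  let total : Nat := lines.countP (fun l => PySem.Chars.isIn ("created".toList) l)
  let r := (lines.reverse).foldl
    (fun (st : Nat × List (List Char)) line =>
      (if PySem.Chars.isIn ("created".toList) line then st.1 - 1 else st.1,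
       st.2 ++ [PySem.List.pyRepeat ("  ".toList) (st.1 : Int) ++ line]))
    (total, [])
  String.mk r.2.reverse.flatten

-- ===== PRECONDITION & SPEC =====
def Spec_indent_type (s : String) (out : String) : Prop := out = indent_type_alt s
instance (s : String) (out : String) : Decidable (Spec_indent_type s out) := by unfold Spec_indent_type; infer_instance

-- ===== CLAIM (what is proved, stated in full; the proofs are below) =====
def Claim_equal_indent_type : Prop := ∀ (s : String), Dom_indent_type s → Spec_indent_type s (indent_type s)

-- ===== LEMMAS AND PROOFS =====

-- 'created' starts with a non-whitespace char, so dropping a whitespace prefix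
-- cannot remove an occurrence.
theorem infix_dropWhile_isspace (cr l : List Char) (hne : cr ≠ [])
    (hhd : ∀ c, cr.head? = some c → PySem.Chars.isspace c = false)
    (h : cr <:+: l) : cr <:+: l.dropWhile PySem.Chars.isspace := by
  induction l with
  | nil => simpa using h
  | cons c t ih =>
    by_cases hc : PySem.Chars.isspace c = true
    · rw [List.dropWhile_cons_of_pos hc]
      rcases List.infix_cons_iff.mp h with hpre | hinf
      · cases cr with
        | nil => exact absurd rfl hne
        | cons a b =>
          have ha : a = c := (List.cons_prefix_cons.mp hpre).1
          have := hhd a rfl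
          rw [ha, hc] at this
          exact absurd this (by simp)
      · exact ih hinf
    · rw [List.dropWhile_cons_of_neg hc]
      exact h

-- `'created' in line.lstrip()` equals `'created' in line`.
theorem isIn_lstrip (l : List Char) :
    PySem.Chars.isIn ("created".toList) (PySem.Chars.lstrip l)
      = PySem.Chars.isIn ("created".toList) l := by
  by_cases h : PySem.Chars.isIn ("created".toList) l = true
  · rw [h]
    rw [PySem.Chars.isIn_iff_infix] at h ⊢
    exact infix_dropWhile_isspace _ _ (by decide) (by intro c hc; cases hc; decide) h
  · have h' : PySem.Chars.isIn ("created".toList) l = false := by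
      cases hb : PySem.Chars.isIn ("created".toList) l
      · rfl
      · exact absurd hb h
    rw [h', PySem.Chars.isIn_eq_false_iff]
    rw [PySem.Chars.isIn_eq_false_iff] at h'
    intro hinf
    exact h' (hinf.trans (List.dropWhile_suffix _).isInfix)

-- Emit each line prefixed by '  ' * (inclusive running count of lines containing cr).
def pvEmit (cr : List Char) (c : Nat) : List (List Char) → List Char
  | [] => []
  | l :: ls =>
    let c' := if PySem.Chars.isIn cr l then c + 1 else c
    PySem.List.pyRepeat ("  ".toList) (c' : Int) ++ l ++ pvEmit cr c' ls

-- A's fold appends exactly pvEmit of the current levels length.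
theorem A_inv (cr : List Char)
    (hlift : ∀ l, PySem.Chars.isIn cr (PySem.Chars.lstrip l) = PySem.Chars.isIn cr l)
    (lines : List (List Char)) (lv : List Int) (acc : List Char) :
    (lines.foldl
      (fun (st : List Int × List Char) line =>
        let ls := PySem.Chars.lstrip line
        let indent : Int := (line.length : Int) - (ls.length : Int)
        let levels := if PySem.Chars.isIn cr ls then st.1 ++ [indent] else st.1
        (levels, st.2 ++ PySem.List.pyRepeat ("  ".toList) (levels.length : Int) ++ line))
      (lv, acc)).2 = acc ++ pvEmit cr lv.length lines := by
  induction lines generalizing lv acc with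
  | nil => simp [pvEmit]
  | cons l ls ih =>
    simp only [List.foldl_cons]
    rw [ih]
    simp only [pvEmit, hlift l]
    by_cases h : PySem.Chars.isIn cr l = true
    · simp [h, List.append_assoc]
    · simp [h, List.append_assoc]

-- The pieces B's fold produces, in production order (last line first): the REVERSE of the output.
def pvPiecesRev (cr : List Char) (c0 : Nat) : List (List Char) → List (List Char)
  | [] => []
  | l :: t =>
    pvPiecesRev cr c0 t ++
      [PySem.List.pyRepeat ("  ".toList)
        ((c0 - t.countP (fun x => PySem.Chars.isIn cr x) : Nat) : Int) ++ l]

theorem B_foldr (cr : List Char) (ls : List (List Char)) (c0 : Nat) (out0 : List (List Char)) :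
    ls.foldr
      (fun line (st : Nat × List (List Char)) =>
        (if PySem.Chars.isIn cr line then st.1 - 1 else st.1,
         st.2 ++ [PySem.List.pyRepeat ("  ".toList) (st.1 : Int) ++ line]))
      (c0, out0)
    = (c0 - ls.countP (fun l => PySem.Chars.isIn cr l),
       out0 ++ pvPiecesRev cr c0 ls) := by
  induction ls with
  | nil => simp [pvPiecesRev]
  | cons l t ih =>
    simp only [List.foldr_cons, ih, pvPiecesRev, List.countP_cons]
    by_cases h : PySem.Chars.isIn cr l = true
    · simp only [h, if_true, Prod.mk.injEq]
      constructor
      · omega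
      · simp [List.append_assoc]
    · simp only [h, if_false, Bool.false_eq_true, Prod.mk.injEq]
      constructor
      · omega
      · simp [List.append_assoc]

theorem B_flatten (cr : List Char) (ls : List (List Char)) (c0 : Nat)
    (hc : ls.countP (fun l => PySem.Chars.isIn cr l) ≤ c0) :
    (pvPiecesRev cr c0 ls).reverse.flatten
      = pvEmit cr (c0 - ls.countP (fun l => PySem.Chars.isIn cr l)) ls := by
  induction ls with
  | nil => simp [pvPiecesRev, pvEmit]
  | cons l t ih =>
    simp only [List.countP_cons] at hc
    have ht : t.countP (fun l => PySem.Chars.isIn cr l) ≤ c0 := by omega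
    simp only [pvPiecesRev, List.reverse_append, List.reverse_singleton, List.singleton_append,
      List.flatten_cons, ih ht, pvEmit]
    by_cases h : PySem.Chars.isIn cr l = true
    · simp only [h, if_true] at hc ⊢
      have h1 : c0 - (t.countP (fun l => PySem.Chars.isIn cr l) + 1) + 1
          = c0 - t.countP (fun l => PySem.Chars.isIn cr l) := by omega
      rw [List.countP_cons]
      simp only [h, if_true]
      rw [h1]
    · simp [h, List.append_assoc]

-- ===== VERDICT (by name: the statement is the Claim_ definition above) =====
theorem indent_type_spec : Claim_equal_indent_type := by
  intro s _
  unfold Spec_indent_type indent_type indent_type_alt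
  simp only []
  rw [A_inv ("created".toList) isIn_lstrip, List.foldl_reverse]
  rw [B_foldr]
  simp only [List.nil_append]
  rw [B_flatten _ _ _ (le_refl _), Nat.sub_self]
  rfl
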